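-- pv_equiv track=rewrite | github.com/therealzanfar/aoc2023 | aoc2023/day01/solution.py | part_b_solution
-- ===== SOURCE A (Python) =====
-- from typing import Optional
--
-- NUMBERS = {
--     "one": 1,
--     "two": 2,
--     "three": 3,
--     "four": 4,
--     "five": 5,
--     "six": 6,
--     "seven": 7,
--     "eight": 8,
--     "nine": 9,
-- }
--
-- def part_b_solution(input_: str) -> Optional[int]:
--     """Compute the solution to a Part B input."""
--     assert len(input_) > 0
--
--     total = 0
--     for line in input_.splitlines():
--         if len(line) <= 0:
--             continue
--
--         trans = convert_numbers(line)
--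
--         digits = [c for c in trans.strip().lower() if c.isdigit()]
--         calibration = digits[0] + digits[-1]
--         value = int(calibration)
--
--         total += value
--
--     return total
--
-- def convert_numbers(line: str) -> str:
--     """Convert spelled-out numbers into digits."""
--     parts: list[str] = []
--
--     for x in range(len(line)):
--         found = False
--         for name, value in NUMBERS.items():
--             if line[x:].startswith(name):
--                 parts.append(str(value))
--                 found = True
--                 break
--
--         if found:
--             continue
--
--         parts.append(line[x])
--
--     return "".join(parts)
-- ===== SOURCE B (Python) =====
-- NUMBERS = {
--     "one": 1,
--     "two": 2,
--     "three": 3,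
--     "four": 4,
--     "five": 5,
--     "six": 6,
--     "seven": 7,
--     "eight": 8,
--     "nine": 9,
-- }
--
-- def part_b_solution(input_: str):
--     """Single pass per line: collect digit values directly, no translated string."""
--     total = 0
--     for line in input_.splitlines():
--         if not line:
--             continue
--         digits: list[int] = []
--         for x, c in enumerate(line):
--             if "0" <= c <= "9":
--                 digits.append(ord(c) - ord("0"))
--             else:
--                 for name, value in NUMBERS.items():
--                     if line.startswith(name, x):
--                         digits.append(value)
--                         break
--         total += 10 * digits[0] + digits[-1]
--     return total
-- ===== Notes on version B (the rewrite author's own statement) =====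
-- stated objective: simpler
-- what changed: B merges convert_numbers and the per-line pipeline (build translated string, strip, lower, filter digit chars, int(first+last)) into one pass per line that collects the digit values as integers directly and adds 10*digits[0]+digits[-1] arithmetically, with no intermediate string.
import Mathlib
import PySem

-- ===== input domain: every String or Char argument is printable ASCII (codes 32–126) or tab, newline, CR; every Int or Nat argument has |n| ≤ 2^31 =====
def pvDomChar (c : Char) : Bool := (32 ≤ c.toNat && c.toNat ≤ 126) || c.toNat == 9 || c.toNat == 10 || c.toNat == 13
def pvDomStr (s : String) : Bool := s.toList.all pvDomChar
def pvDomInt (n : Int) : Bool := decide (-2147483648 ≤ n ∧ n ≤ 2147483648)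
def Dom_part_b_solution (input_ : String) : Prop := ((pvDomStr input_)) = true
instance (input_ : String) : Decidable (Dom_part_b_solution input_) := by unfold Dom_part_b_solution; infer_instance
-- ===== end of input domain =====

-- B replaces A's translate-to-string / strip / lower / filter / int(first+last) pipeline by a single
-- pass per line that collects the digit VALUES directly (objective: simpler).

-- ===== PORT A =====

-- the module constant NUMBERS (a dict with distinct keys, read in insertion order)
def pvNUMBERS : List (List Char × Int) :=
  [(['o','n','e'], 1), (['t','w','o'], 2), (['t','h','r','e','e'], 3), (['f','o','u','r'], 4),
   (['f','i','v','e'], 5), (['s','i','x'], 6), (['s','e','v','e','n'], 7), (['e','i','g','h','t'], 8),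
   (['n','i','n','e'], 9)]

-- the inner 'for name, value in NUMBERS.items(): if line[x:].startswith(name): … break' loop
-- (shared by both ports: A and B contain this loop verbatim)
def pvMatchWord : List (List Char × Int) → List Char → Option Int
  | [], _ => none
  | (n, v) :: rest, s => if PySem.Chars.startswith s n then some v else pvMatchWord rest s

-- convert_numbers: the loop over x in range(len(line)) reads only line[x:] / line[x], so it is
-- transcribed as recursion on the current suffix; parts are joined by ++ ("".join)
def pvConvert : List Char → List Char
  | [] => []
  | c :: rest =>
    (match pvMatchWord pvNUMBERS (c :: rest) with
     | some v => PySem.Int.toChars v          -- parts.append(str(value))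
     | none => [c]) ++ pvConvert rest         -- parts.append(line[x])

def part_b_solution (input_ : String) : Option Int :=
  if 0 < PySem.Str.len input_ then             -- assert len(input_) > 0 (none = AssertionError)
    (PySem.Chars.splitlines input_.toList).foldl
      (fun acc line => acc.bind fun total =>
        if PySem.Chars.len line ≤ 0 then some total      -- continue
        else
          let digits := (PySem.Chars.lower (PySem.Chars.strip (pvConvert line))).filter
            PySem.Chars.isdigit
          match PySem.List.pyGet? digits 0, PySem.List.pyGet? digits (-1) with
          | some d0, some d1 => (PySem.Int.ofChars? [d0, d1]).map (fun v => total + v)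
          | _, _ => none)                                 -- IndexError on digits[0]/digits[-1]
      (some 0)
  else none

-- ===== PORT B =====

def pvDigitVal (c : Char) : Int := (c.toNat : Int) - 48   -- ord(c) - ord("0")

-- the per-line loop of B: one pass over the positions (again: only line[x:] is read),
-- collecting digit values directly
def pvLineDigits : List Char → List Int
  | [] => []
  | c :: rest =>
    if '0' ≤ c ∧ c ≤ '9' then pvDigitVal c :: pvLineDigits rest
    else
      match pvMatchWord pvNUMBERS (c :: rest) with       -- line.startswith(name, x)
      | some v => v :: pvLineDigits rest
      | none => pvLineDigits rest

def part_b_solution_alt (input_ : String) : Option Int :=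
  (PySem.Chars.splitlines input_.toList).foldl
    (fun acc line => acc.bind fun total =>
      if line.isEmpty then some total                    -- if not line: continue
      else
        match pvLineDigits line with
        | [] => none                                     -- digits[0] raises IndexError
        | d :: ds => some (total + (10 * d + (d :: ds).getLast (List.cons_ne_nil d ds))))
    (some 0)

-- ===== PRECONDITION & SPEC =====

def pvHasDigitWord (line : List Char) : Bool :=
  line.any PySem.Chars.isdigit || pvNUMBERS.any (fun p => PySem.Chars.isIn p.1 line)

-- Pre_ excludes exactly the inputs on which A raises: the empty string (assert len(input_) > 0
-- fails) and inputs with a non-empty line containing no ASCII digit and no spelled-out number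
-- word, where digits[0] raises IndexError.
def Pre_part_b_solution (input_ : String) : Prop :=
  input_.toList ≠ [] ∧
    ∀ line ∈ PySem.Chars.splitlines input_.toList, line ≠ [] → pvHasDigitWord line = true
instance (input_ : String) : Decidable (Pre_part_b_solution input_) := by
  unfold Pre_part_b_solution; infer_instance

def pvWitness_part_b_solution : String := "1abc2\ntwone"

def Spec_part_b_solution (input_ : String) (out : Option Int) : Prop := out = part_b_solution_alt input_
instance (input_ : String) (out : Option Int) : Decidable (Spec_part_b_solution input_ out) := by
  unfold Spec_part_b_solution; infer_instance

-- ===== CLAIM (what is proved, stated in full; the proofs are below) =====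
def Claim_equal_part_b_solution : Prop := ∀ (input_ : String), Dom_part_b_solution input_ → Pre_part_b_solution input_ → Spec_part_b_solution input_ (part_b_solution input_)

-- ===== LEMMAS AND PROOFS =====

theorem pv_char_eq_toNat (a b : Char) (h : a.toNat = b.toNat) : a = b := by
  apply Char.ext; apply UInt32.toNat_inj.mp; exact h

theorem pv_isdigit_iff (c : Char) : PySem.Chars.isdigit c = true ↔ 48 ≤ c.toNat ∧ c.toNat ≤ 57 := by
  simp only [PySem.Chars.isdigit, Bool.and_eq_true, decide_eq_true_eq, Char.le_def,
    UInt32.le_iff_toNat_le]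
  exact Iff.rfl

theorem pv_digit_char_cases (c : Char) (h : PySem.Chars.isdigit c = true) :
    c = '0' ∨ c = '1' ∨ c = '2' ∨ c = '3' ∨ c = '4' ∨ c = '5' ∨ c = '6' ∨ c = '7' ∨ c = '8' ∨ c = '9' := by
  have h1 := (pv_isdigit_iff c).mp h
  have h2 : c.toNat = 48 ∨ c.toNat = 49 ∨ c.toNat = 50 ∨ c.toNat = 51 ∨ c.toNat = 52 ∨
      c.toNat = 53 ∨ c.toNat = 54 ∨ c.toNat = 55 ∨ c.toNat = 56 ∨ c.toNat = 57 := by omega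
  rcases h2 with h2|h2|h2|h2|h2|h2|h2|h2|h2|h2
  · exact Or.inl (pv_char_eq_toNat c '0' h2)
  · exact Or.inr (Or.inl (pv_char_eq_toNat c '1' h2))
  · exact Or.inr (Or.inr (Or.inl (pv_char_eq_toNat c '2' h2)))
  · exact Or.inr (Or.inr (Or.inr (Or.inl (pv_char_eq_toNat c '3' h2))))
  · exact Or.inr (Or.inr (Or.inr (Or.inr (Or.inl (pv_char_eq_toNat c '4' h2)))))
  · exact Or.inr (Or.inr (Or.inr (Or.inr (Or.inr (Or.inl (pv_char_eq_toNat c '5' h2))))))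
  · exact Or.inr (Or.inr (Or.inr (Or.inr (Or.inr (Or.inr (Or.inl (pv_char_eq_toNat c '6' h2)))))))
  · exact Or.inr (Or.inr (Or.inr (Or.inr (Or.inr (Or.inr (Or.inr (Or.inl (pv_char_eq_toNat c '7' h2))))))))
  · exact Or.inr (Or.inr (Or.inr (Or.inr (Or.inr (Or.inr (Or.inr (Or.inr (Or.inl (pv_char_eq_toNat c '8' h2)))))))))
  · exact Or.inr (Or.inr (Or.inr (Or.inr (Or.inr (Or.inr (Or.inr (Or.inr (Or.inr (pv_char_eq_toNat c '9' h2)))))))))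

-- int(a + b) on two ASCII-digit characters
theorem pv_ofChars_two (a b : Char) (ha : PySem.Chars.isdigit a = true)
    (hb : PySem.Chars.isdigit b = true) :
    PySem.Int.ofChars? [a, b] = some (10 * pvDigitVal a + pvDigitVal b) := by
  rcases pv_digit_char_cases a ha with rfl|rfl|rfl|rfl|rfl|rfl|rfl|rfl|rfl|rfl <;>
    rcases pv_digit_char_cases b hb with rfl|rfl|rfl|rfl|rfl|rfl|rfl|rfl|rfl|rfl <;> decide

theorem pv_isspace_not_digit (c : Char) (h : PySem.Chars.isspace c = true) :
    PySem.Chars.isdigit c = false := by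
  simp only [PySem.Chars.isspace, decide_eq_true_eq, Bool.or_eq_true, Bool.and_eq_true] at h
  rw [Bool.eq_false_iff, Ne, pv_isdigit_iff]
  omega

theorem pv_filter_isdigit_dropWhile (s : List Char) :
    (s.dropWhile PySem.Chars.isspace).filter PySem.Chars.isdigit = s.filter PySem.Chars.isdigit := by
  induction s with
  | nil => rfl
  | cons c t ih =>
    by_cases hc : PySem.Chars.isspace c = true
    · rw [List.dropWhile_cons, if_pos hc, ih, List.filter_cons,
        if_neg (by simp [pv_isspace_not_digit c hc])]
    · rw [List.dropWhile_cons, if_neg hc]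

theorem pv_filter_isdigit_strip (s : List Char) :
    (PySem.Chars.strip s).filter PySem.Chars.isdigit = s.filter PySem.Chars.isdigit := by
  rw [PySem.Chars.strip, PySem.Chars.rstrip, PySem.Chars.lstrip, List.filter_reverse,
    pv_filter_isdigit_dropWhile, List.filter_reverse, List.reverse_reverse,
    pv_filter_isdigit_dropWhile]

theorem pv_lowerChar_digit (c : Char) :
    PySem.Chars.isdigit (PySem.Chars.lowerChar c) = PySem.Chars.isdigit c ∧
      (PySem.Chars.isdigit c = true → PySem.Chars.lowerChar c = c) := by
  unfold PySem.Chars.lowerChar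
  by_cases hu : PySem.Chars.isupper c = true
  · rw [if_pos hu]
    have hb : 65 ≤ c.toNat ∧ c.toNat ≤ 90 := by
      simpa only [PySem.Chars.isupper, Bool.and_eq_true, decide_eq_true_eq, Char.le_def,
        UInt32.le_iff_toNat_le] using hu
    have hval : (c.toNat + 32).isValidChar := by left; omega
    have hv : (Char.ofNat (c.toNat + 32)).toNat = c.toNat + 32 := by
      rw [Char.toNat_ofNat, if_pos hval]
    constructor
    · rw [Bool.eq_iff_iff, pv_isdigit_iff, pv_isdigit_iff, hv]
      omega
    · intro hd
      rw [pv_isdigit_iff] at hd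
      omega
  · rw [if_neg hu]; exact ⟨rfl, fun _ => rfl⟩

theorem pv_filter_isdigit_lower (s : List Char) :
    (PySem.Chars.lower s).filter PySem.Chars.isdigit = s.filter PySem.Chars.isdigit := by
  rw [PySem.Chars.lower]
  induction s with
  | nil => rfl
  | cons c t ih =>
    obtain ⟨h1, h2⟩ := pv_lowerChar_digit c
    rw [List.map_cons, List.filter_cons, List.filter_cons, h1]
    by_cases hc : PySem.Chars.isdigit c = true
    · rw [if_pos (by simp [hc]), if_pos (by simp [hc]), ih, h2 hc]
    · rw [if_neg (by simpa using hc), if_neg (by simpa using hc), ih]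

theorem pv_matchWord_some {ns : List (List Char × Int)} {s : List Char} {v : Int}
    (h : pvMatchWord ns s = some v) : ∃ p ∈ ns, p.1 <+: s ∧ p.2 = v := by
  induction ns with
  | nil => simp [pvMatchWord] at h
  | cons q rest ih =>
    obtain ⟨n, w⟩ := q
    rw [pvMatchWord] at h
    by_cases hs : PySem.Chars.startswith s n = true
    · rw [if_pos hs] at h
      exact ⟨(n, w), List.mem_cons_self, (PySem.Chars.startswith_iff s n).mp hs, by simpa using h⟩
    · rw [if_neg hs] at h
      obtain ⟨p, hp, h1, h2⟩ := ih h
      exact ⟨p, List.mem_cons_of_mem _ hp, h1, h2⟩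

theorem pv_matchWord_ne_none {ns : List (List Char × Int)} {s : List Char}
    (h : ∃ p ∈ ns, p.1 <+: s) : pvMatchWord ns s ≠ none := by
  induction ns with
  | nil => simp at h
  | cons q rest ih =>
    obtain ⟨n, w⟩ := q
    rw [pvMatchWord]
    by_cases hs : PySem.Chars.startswith s n = true
    · rw [if_pos hs]; simp
    · rw [if_neg hs]
      apply ih
      obtain ⟨p, hp, hpre⟩ := h
      rcases List.mem_cons.mp hp with rfl | hp'
      · exact absurd ((PySem.Chars.startswith_iff s n).mpr hpre) hs
      · exact ⟨p, hp', hpre⟩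

theorem pv_digit_no_word (c : Char) (rest : List Char) (h : PySem.Chars.isdigit c = true) :
    pvMatchWord pvNUMBERS (c :: rest) = none := by
  cases heq : pvMatchWord pvNUMBERS (c :: rest) with
  | none => rfl
  | some v =>
    exfalso
    obtain ⟨p, hp, hpre, -⟩ := pv_matchWord_some heq
    fin_cases hp <;>
      · obtain ⟨rfl, -⟩ := List.cons_prefix_cons.mp hpre
        exact absurd h (by decide)

theorem pv_bdigit (c : Char) : ('0' ≤ c ∧ c ≤ '9') ↔ PySem.Chars.isdigit c = true := by
  simp [PySem.Chars.isdigit]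

-- str(value) for the nine dictionary values is a single ASCII digit with that value
theorem pv_word_chunk (v : Int) (hv : v ∈ ([1,2,3,4,5,6,7,8,9] : List Int)) :
    ((PySem.Int.toChars v).filter PySem.Chars.isdigit).map pvDigitVal = [v] := by
  fin_cases hv <;> decide

theorem pv_digits_eq (line : List Char) :
    ((pvConvert line).filter PySem.Chars.isdigit).map pvDigitVal = pvLineDigits line := by
  induction line with
  | nil => rfl
  | cons c rest ih =>
    rw [pvConvert, pvLineDigits, List.filter_append, List.map_append, ih]
    by_cases hc : PySem.Chars.isdigit c = true
    · rw [pv_digit_no_word c rest hc, if_pos (pv_bdigit c |>.mpr hc)]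
      simp [hc, pvDigitVal]
    · rw [if_neg (fun hh => hc (pv_bdigit c |>.mp hh))]
      cases hm : pvMatchWord pvNUMBERS (c :: rest) with
      | none => simp [hc]
      | some v =>
        obtain ⟨p, hp, -, rfl⟩ := pv_matchWord_some hm
        have hv : p.2 ∈ ([1,2,3,4,5,6,7,8,9] : List Int) := by fin_cases hp <;> decide
        show ((PySem.Int.toChars p.2).filter PySem.Chars.isdigit).map pvDigitVal ++
            pvLineDigits rest = p.2 :: pvLineDigits rest
        rw [pv_word_chunk p.2 hv]
        rfl

theorem pv_lineDigits_ne_nil_of_digit (line : List Char)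
    (h : ∃ c ∈ line, PySem.Chars.isdigit c = true) : pvLineDigits line ≠ [] := by
  induction line with
  | nil => simp at h
  | cons a t ih =>
    rw [pvLineDigits]
    by_cases ha : '0' ≤ a ∧ a ≤ '9'
    · rw [if_pos ha]; exact List.cons_ne_nil _ _
    · rw [if_neg ha]
      cases hm : pvMatchWord pvNUMBERS (a :: t) with
      | some v => exact List.cons_ne_nil _ _
      | none =>
        apply ih
        obtain ⟨c, hc, hd⟩ := h
        rcases List.mem_cons.mp hc with rfl | hc'
        · exact absurd (pv_bdigit c |>.mpr hd) ha
        · exact ⟨c, hc', hd⟩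

theorem pv_lineDigits_ne_nil_of_word (line : List Char) (p : List Char × Int)
    (hp : p ∈ pvNUMBERS) (h : p.1 <:+: line) : pvLineDigits line ≠ [] := by
  induction line with
  | nil =>
    exact ((by decide : ∀ q ∈ pvNUMBERS, q.1 ≠ ([] : List Char)) p hp (List.infix_nil.mp h)).elim
  | cons a t ih =>
    rw [pvLineDigits]
    by_cases ha : '0' ≤ a ∧ a ≤ '9'
    · rw [if_pos ha]; exact List.cons_ne_nil _ _
    · rw [if_neg ha]
      rcases List.infix_cons_iff.mp h with hpre | hinf
      · cases hm : pvMatchWord pvNUMBERS (a :: t) with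
        | some v => exact List.cons_ne_nil _ _
        | none => exact absurd hm (pv_matchWord_ne_none ⟨p, hp, hpre⟩)
      · cases hm : pvMatchWord pvNUMBERS (a :: t) with
        | some v => exact List.cons_ne_nil _ _
        | none => exact ih hinf

theorem pv_hasDW_ne_nil (line : List Char) (h : pvHasDigitWord line = true) :
    pvLineDigits line ≠ [] := by
  rw [pvHasDigitWord, Bool.or_eq_true, List.any_eq_true, List.any_eq_true] at h
  rcases h with h | ⟨p, hp, hin⟩
  · exact pv_lineDigits_ne_nil_of_digit line h
  · exact pv_lineDigits_ne_nil_of_word line p hp ((PySem.Chars.isIn_iff_infix p.1 line).mp hin)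

theorem pv_pyGet_zero {α : Type} (a : α) (as : List α) :
    PySem.List.pyGet? (a :: as) 0 = some a := by
  simp [PySem.List.pyGet?, PySem.List.pyIdx?]

theorem pv_pyGet_neg_one {α : Type} (xs : List α) :
    PySem.List.pyGet? xs (-1) = xs.getLast? := by
  cases xs with
  | nil => rfl
  | cons a t =>
    simp only [PySem.List.pyGet?, PySem.List.pyIdx?]
    rw [if_neg (by omega), if_pos (by simp), List.getLast?_eq_getElem?]
    norm_num

theorem pv_line_step (l : List Char) (h : l ≠ [] → pvHasDigitWord l = true) (total : Int) :
    (if PySem.Chars.len l ≤ 0 then some total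
     else
       let digits := (PySem.Chars.lower (PySem.Chars.strip (pvConvert l))).filter
         PySem.Chars.isdigit
       match PySem.List.pyGet? digits 0, PySem.List.pyGet? digits (-1) with
       | some d0, some d1 => (PySem.Int.ofChars? [d0, d1]).map (fun v => total + v)
       | _, _ => none)
    = (if l.isEmpty then some total
       else
         match pvLineDigits l with
         | [] => none
         | d :: ds => some (total + (10 * d + (d :: ds).getLast (List.cons_ne_nil d ds)))) := by
  by_cases hnil : l = []
  · subst hnil
    rw [if_pos (by simp [PySem.Chars.len]), if_pos (by simp)]
  · have hDW := h hnil
    rw [if_neg (by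
      simp only [PySem.Chars.len, not_le]
      exact_mod_cast List.length_pos_iff.mpr hnil),
      if_neg (by simpa using hnil)]
    simp only
    have hEq : ((PySem.Chars.lower (PySem.Chars.strip (pvConvert l))).filter
        PySem.Chars.isdigit).map pvDigitVal = pvLineDigits l := by
      rw [pv_filter_isdigit_lower, pv_filter_isdigit_strip, pv_digits_eq]
    have hne : (PySem.Chars.lower (PySem.Chars.strip (pvConvert l))).filter
        PySem.Chars.isdigit ≠ [] := by
      intro h0
      exact pv_hasDW_ne_nil l hDW (by rw [← hEq, h0]; rfl)
    obtain ⟨a, as, hcons⟩ := List.exists_cons_of_ne_nil hne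
    rw [hcons, pv_pyGet_zero, pv_pyGet_neg_one,
      List.getLast?_eq_some_getLast (List.cons_ne_nil a as)]
    have ha : PySem.Chars.isdigit a = true := by
      have : a ∈ (PySem.Chars.lower (PySem.Chars.strip (pvConvert l))).filter
          PySem.Chars.isdigit := by rw [hcons]; exact List.mem_cons_self
      exact (List.mem_filter.mp this).2
    have hlast : PySem.Chars.isdigit ((a :: as).getLast (List.cons_ne_nil a as)) = true := by
      have : (a :: as).getLast (List.cons_ne_nil a as) ∈
          (PySem.Chars.lower (PySem.Chars.strip (pvConvert l))).filter PySem.Chars.isdigit := by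
        rw [hcons]; exact List.getLast_mem _
      exact (List.mem_filter.mp this).2
    rw [← hEq, hcons, List.map_cons]
    simp only [pv_ofChars_two a _ ha hlast, Option.map_some]
    have hgl : (pvDigitVal a :: as.map pvDigitVal).getLast (List.cons_ne_nil _ _)
        = pvDigitVal ((a :: as).getLast (List.cons_ne_nil a as)) := by
      have h1 := List.getLast?_map (f := pvDigitVal) (l := a :: as)
      rw [List.getLast?_eq_some_getLast (List.cons_ne_nil a as)] at h1
      rw [List.map_cons] at h1
      rw [List.getLast?_eq_some_getLast (List.cons_ne_nil (pvDigitVal a) (as.map pvDigitVal))] at h1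
      exact Option.some.inj h1
    rw [hgl]

theorem pv_fold_eq (lines : List (List Char)) (t : Int)
    (h : ∀ l ∈ lines, l ≠ [] → pvHasDigitWord l = true) :
    lines.foldl
      (fun acc line => acc.bind fun total =>
        if PySem.Chars.len line ≤ 0 then some total
        else
          let digits := (PySem.Chars.lower (PySem.Chars.strip (pvConvert line))).filter
            PySem.Chars.isdigit
          match PySem.List.pyGet? digits 0, PySem.List.pyGet? digits (-1) with
          | some d0, some d1 => (PySem.Int.ofChars? [d0, d1]).map (fun v => total + v)
          | _, _ => none)
      (some t)
    = lines.foldl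
        (fun acc line => acc.bind fun total =>
          if line.isEmpty then some total
          else
            match pvLineDigits line with
            | [] => none
            | d :: ds => some (total + (10 * d + (d :: ds).getLast (List.cons_ne_nil d ds))))
        (some t) := by
  induction lines generalizing t with
  | nil => rfl
  | cons l ls ih =>
    rw [List.foldl_cons, List.foldl_cons, Option.bind_some, Option.bind_some,
      pv_line_step l (fun hnil => h l List.mem_cons_self hnil) t]
    by_cases hnil : l = []
    · subst hnil
      rw [if_pos (by simp)]
      exact ih _ (fun l' hl' => h l' (List.mem_cons_of_mem _ hl'))
    · rw [if_neg (by simpa using hnil)]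
      cases hd : pvLineDigits l with
      | nil => exact absurd hd (pv_hasDW_ne_nil l (h l List.mem_cons_self hnil))
      | cons d ds => exact ih _ (fun l' hl' => h l' (List.mem_cons_of_mem _ hl'))

-- ===== VERDICT (by name: the statement is the Claim_ definition above) =====
theorem part_b_solution_spec : Claim_equal_part_b_solution := by
  intro input_ _ hpre
  obtain ⟨hne, hlines⟩ := hpre
  unfold Spec_part_b_solution part_b_solution part_b_solution_alt
  rw [if_pos]
  · exact pv_fold_eq _ 0 hlines
  · simp [PySem.Str.len]
    exact List.length_pos_iff.mpr hne
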